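-- pv_equiv track=rewrite | github.com/dayioh/epub2md | scripts/epub_to_markdown.py | merge_chapter_headings
-- ===== SOURCE A (Python) =====
-- def merge_chapter_headings(markdown: str) -> str:
--     """Fusionne les couples 'Chapter X' + titre qui suivent immédiatement."""
--     lines = markdown.splitlines()
--     merged: list[str] = []
--     i = 0
--
--     while i < len(lines):
--         line = lines[i]
--         if line.startswith('## Chapter '):
--             # Cherche le prochain heading de même niveau
--             j = i + 1
--             while j < len(lines) and lines[j].strip() == '':
--                 j += 1
--             if j < len(lines) and lines[j].startswith('## '):
--                 title1 = line[3:].strip()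
--                 title2 = lines[j][3:].strip()
--                 if not title2.lower().startswith('chapter '):
--                     merged.append(f'## {title1} {title2}')
--                     i = j + 1
--                     continue
--         merged.append(line)
--         i += 1
--
--     return '\n'.join(merged)
-- ===== SOURCE B (Python) =====
-- def merge_chapter_headings(markdown: str) -> str:
--     """Single forward pass with a pending-chapter state machine (no index look-ahead)."""
--     out: list[str] = []
--     pending = None            # a '## Chapter ...' line waiting for its title
--     blanks: list[str] = []    # blank lines seen while waiting
--
--     for line in markdown.splitlines():
--         if pending is not None:
--             if line.strip() == '':
--                 blanks.append(line)
--                 continue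
--             if line.startswith('## ') and not line[3:].strip().lower().startswith('chapter '):
--                 out.append(f'## {pending[3:].strip()} {line[3:].strip()}')
--                 pending = None
--                 blanks = []
--                 continue
--             out.append(pending)
--             out.extend(blanks)
--             pending = None
--             blanks = []
--         if line.startswith('## Chapter '):
--             pending = line
--         else:
--             out.append(line)
--
--     if pending is not None:
--         out.append(pending)
--         out.extend(blanks)
--     return '\n'.join(out)
-- ===== Notes on version B (the rewrite author's own statement) =====
-- stated objective: alternative
-- what changed: A's index-driven while loop with an inner look-ahead scan over blank lines is replaced by a single forward state-machine pass that keeps a pending chapter heading and a buffer of blank lines, with no index arithmetic or look-ahead.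
import Mathlib
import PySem

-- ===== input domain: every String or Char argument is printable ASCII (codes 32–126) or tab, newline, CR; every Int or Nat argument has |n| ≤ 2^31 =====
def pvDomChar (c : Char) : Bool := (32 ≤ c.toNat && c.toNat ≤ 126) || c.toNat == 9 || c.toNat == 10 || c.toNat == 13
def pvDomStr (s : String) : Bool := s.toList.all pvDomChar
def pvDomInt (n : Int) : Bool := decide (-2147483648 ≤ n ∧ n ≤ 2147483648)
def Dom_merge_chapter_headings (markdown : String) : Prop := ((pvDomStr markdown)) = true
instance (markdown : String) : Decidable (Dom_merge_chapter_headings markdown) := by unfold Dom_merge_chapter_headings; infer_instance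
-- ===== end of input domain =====

-- B replaces A's index loop with look-ahead by a single forward state-machine pass
-- (pending chapter line + buffered blanks); objective: alternative decomposition, same cost.

-- shared tiny helpers (both Pythons evaluate these very expressions)
def pvBlank (s : String) : Bool := PySem.Str.strip s == ""
def pvIsChap (s : String) : Bool := PySem.Str.startswith s "## Chapter "
def pvTail3 (s : String) : String := PySem.Str.strip (PySem.Str.slice s (some 3) none)
def pvTitle2Chap (s : String) : Bool :=
  PySem.Str.startswith (PySem.Str.lower (pvTail3 s)) "chapter "

-- ===== PORT A =====
-- A's while loop over an index i, with an inner look-ahead loop skipping blanks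
-- (the inner 'while lines[j].strip() == "": j += 1' is List.dropWhile pvBlank).
def pvGoA : List String → List String
  | [] => []
  | line :: rest =>
    if pvIsChap line then
      match h : rest.dropWhile pvBlank with
      | [] => line :: pvGoA rest
      | l2 :: rest2 =>
        if PySem.Str.startswith l2 "## " && !pvTitle2Chap l2 then
          ("## " ++ pvTail3 line ++ " " ++ pvTail3 l2) :: pvGoA rest2
        else line :: pvGoA rest
    else line :: pvGoA rest
termination_by l => l.length
decreasing_by
  · simp
  · have := List.length_dropWhile_le pvBlank rest
    rw [h] at this
    simp at this ⊢
    omega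
  · simp
  · simp

def merge_chapter_headings (markdown : String) : String :=
  PySem.Str.join "\n" (pvGoA (PySem.Str.splitlines markdown))

-- ===== PORT B =====
-- B's single pass: pending chapter heading (Option) plus the blank lines buffered
-- since it; on a non-blank line either merge, or flush and handle the line afresh.
def pvGoB : List String → Option String → List String → List String
  | [], p, b => match p with | none => [] | some c => c :: b
  | line :: rest, some c, b =>
    if pvBlank line then pvGoB rest (some c) (b ++ [line])
    else if PySem.Str.startswith line "## " && !pvTitle2Chap line then
      ("## " ++ pvTail3 c ++ " " ++ pvTail3 line) :: pvGoB rest none []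
    else
      (c :: b) ++
        (if pvIsChap line then pvGoB rest (some line) [] else line :: pvGoB rest none [])
  | line :: rest, none, _ =>
    if pvIsChap line then pvGoB rest (some line) [] else line :: pvGoB rest none []

def merge_chapter_headings_alt (markdown : String) : String :=
  PySem.Str.join "\n" (pvGoB (PySem.Str.splitlines markdown) none [])

-- ===== PRECONDITION & SPEC =====
def Spec_merge_chapter_headings (markdown : String) (out : String) : Prop := out = merge_chapter_headings_alt markdown
instance (markdown : String) (out : String) : Decidable (Spec_merge_chapter_headings markdown out) := by unfold Spec_merge_chapter_headings; infer_instance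

-- ===== CLAIM (what is proved, stated in full; the proofs are below) =====
def Claim_equal_merge_chapter_headings : Prop := ∀ (markdown : String), Dom_merge_chapter_headings markdown → Spec_merge_chapter_headings markdown (merge_chapter_headings markdown)

-- ===== LEMMAS AND PROOFS =====

-- a blank line is all whitespace, hence no '## …' prefix
theorem pvBlank_all_isspace (l : String) (h : pvBlank l = true) :
    ∀ x ∈ l.toList, PySem.Chars.isspace x = true := by
  have hs : PySem.Chars.strip l.toList = [] := by
    have := (beq_iff_eq.mp h)
    have := congrArg String.toList this
    simpa [PySem.Str.toList_strip] using this
  unfold PySem.Chars.strip PySem.Chars.rstrip PySem.Chars.lstrip at hs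
  have h2 : (List.dropWhile PySem.Chars.isspace
      (List.dropWhile PySem.Chars.isspace l.toList).reverse) = [] := by
    simpa using congrArg List.reverse hs
  have hall : ∀ x ∈ List.dropWhile PySem.Chars.isspace l.toList, PySem.Chars.isspace x = true := by
    intro x hx
    exact List.dropWhile_eq_nil_iff.mp h2 x (List.mem_reverse.mpr hx)
  intro x hx
  rw [← List.takeWhile_append_dropWhile (p := PySem.Chars.isspace) (l := l.toList)] at hx
  rcases List.mem_append.mp hx with h' | h'
  · exact List.mem_takeWhile_imp h'
  · exact hall x h'

theorem pvBlank_not_chap (l : String) (h : pvBlank l = true) : pvIsChap l = false := by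
  by_contra hc
  have hc' : pvIsChap l = true := by revert hc; cases pvIsChap l <;> simp
  unfold pvIsChap at hc'
  simp only [PySem.Str.startswith_eq] at hc'
  rcases (PySem.Chars.startswith_iff _ _).mp hc' with ⟨t, ht⟩
  have hmem : '#' ∈ l.toList := by rw [← ht]; simp
  have := pvBlank_all_isspace l h '#' hmem
  simp [PySem.Chars.isspace] at this

theorem goA_nil : pvGoA [] = [] := by rw [pvGoA.eq_def]

-- unfold lemmas for pvGoA (its match is dependent, so rewrite through these)
theorem goA_notchap (line : String) (rest : List String) (hc : pvIsChap line = false) :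
    pvGoA (line :: rest) = line :: pvGoA rest := by
  rw [pvGoA.eq_def]; simp [hc]

theorem goA_chap_nil (line : String) (rest : List String) (hc : pvIsChap line = true)
    (hd : rest.dropWhile pvBlank = []) : pvGoA (line :: rest) = line :: pvGoA rest := by
  rw [pvGoA.eq_def]
  simp only [hc, if_true]
  split
  · rfl
  · rename_i l2 rest2 heq; rw [hd] at heq; exact absurd heq (by simp)

theorem goA_chap_cons_merge (line l2 : String) (rest rest2 : List String)
    (hc : pvIsChap line = true) (hd : rest.dropWhile pvBlank = l2 :: rest2)
    (hm : (PySem.Str.startswith l2 "## " && !pvTitle2Chap l2) = true) :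
    pvGoA (line :: rest) = ("## " ++ pvTail3 line ++ " " ++ pvTail3 l2) :: pvGoA rest2 := by
  rw [pvGoA.eq_def]
  simp only [hc, if_true]
  split
  · rename_i heq; rw [hd] at heq; exact absurd heq (by simp)
  · rename_i l2' rest2' heq
    rw [hd] at heq
    obtain ⟨h1, h2⟩ : l2 = l2' ∧ rest2 = rest2' := by
      constructor <;> [exact (List.cons.injEq ..).mp heq |>.1; exact (List.cons.injEq ..).mp heq |>.2]
    subst h1; subst h2
    rw [if_pos hm]

theorem goA_chap_cons_nomerge (line l2 : String) (rest rest2 : List String)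
    (hc : pvIsChap line = true) (hd : rest.dropWhile pvBlank = l2 :: rest2)
    (hm : (PySem.Str.startswith l2 "## " && !pvTitle2Chap l2) = false) :
    pvGoA (line :: rest) = line :: pvGoA rest := by
  rw [pvGoA.eq_def]
  simp only [hc, if_true]
  split
  · rfl
  · rename_i l2' rest2' heq
    rw [hd] at heq
    obtain ⟨h1, h2⟩ : l2 = l2' ∧ rest2 = rest2' := by
      constructor <;> [exact (List.cons.injEq ..).mp heq |>.1; exact (List.cons.injEq ..).mp heq |>.2]
    subst h1; subst h2
    rw [if_neg (by rw [hm]; simp)]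

-- blank lines pass through A untouched
theorem goA_blank_prefix (b : List String) (xs : List String)
    (hb : ∀ l ∈ b, pvBlank l = true) : pvGoA (b ++ xs) = b ++ pvGoA xs := by
  induction b with
  | nil => simp
  | cons l b ih =>
    have hl := hb l (by simp)
    rw [List.cons_append, goA_notchap l _ (pvBlank_not_chap l hl),
      ih (fun l' h' => hb l' (by simp [h'])), List.cons_append]

theorem dropWhile_blank_prefix (b : List String) (xs : List String)
    (hb : ∀ l ∈ b, pvBlank l = true) :
    (b ++ xs).dropWhile pvBlank = xs.dropWhile pvBlank := by
  induction b with
  | nil => simp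
  | cons l b ih =>
    have hl := hb l (by simp)
    rw [List.cons_append, List.dropWhile_cons_of_pos hl]
    exact ih (fun l' h' => hb l' (by simp [h']))

-- the key invariant: the state machine with pending c and blank buffer b computes
-- exactly what A computes on c :: b ++ lines; and with no pending, A itself.
theorem pvKey (lines : List String) :
    (∀ c b, pvIsChap c = true → (∀ l ∈ b, pvBlank l = true) →
      pvGoB lines (some c) b = pvGoA (c :: (b ++ lines))) ∧
    pvGoB lines none [] = pvGoA lines := by
  induction lines with
  | nil =>
    constructor
    · intro c b hc hb
      have hba : pvGoA b = b := by simpa [goA_nil] using goA_blank_prefix b [] hb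
      rw [List.append_nil,
        goA_chap_nil c b hc (by rw [List.dropWhile_eq_nil_iff]; exact hb), hba]
      simp [pvGoB]
    · simp [pvGoB, goA_nil]
  | cons line rest ih =>
    obtain ⟨ihk, ih0⟩ := ih
    have hline : (if pvIsChap line = true then pvGoB rest (some line) []
        else line :: pvGoB rest none []) = pvGoA (line :: rest) := by
      by_cases hc : pvIsChap line = true
      · rw [if_pos hc]; simpa using ihk line [] hc (by simp)
      · have hc' : pvIsChap line = false := by revert hc; cases pvIsChap line <;> simp
        rw [if_neg hc, ih0, goA_notchap line rest hc']
    constructor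
    · intro c b hc hb
      by_cases hbl : pvBlank line = true
      · -- blank: buffer it
        have hb' : ∀ l ∈ b ++ [line], pvBlank l = true := by
          intro l hl
          rcases List.mem_append.mp hl with h' | h'
          · exact hb l h'
          · simp at h'; subst h'; exact hbl
        rw [pvGoB, if_pos hbl, ihk c (b ++ [line]) hc hb']
        simp
      · have hbl' : pvBlank line = false := by revert hbl; cases pvBlank line <;> simp
        have hdrop : (b ++ line :: rest).dropWhile pvBlank = line :: rest := by
          rw [dropWhile_blank_prefix b _ hb, List.dropWhile_cons_of_neg (by simp [hbl'])]
        by_cases hm : (PySem.Str.startswith line "## " && !pvTitle2Chap line) = true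
        · -- merge
          rw [pvGoB, if_neg (by rw [hbl']; simp), if_pos hm, ih0,
            goA_chap_cons_merge c line (b ++ line :: rest) rest hc hdrop hm]
        · have hm' : (PySem.Str.startswith line "## " && !pvTitle2Chap line) = false := by
            revert hm; cases (PySem.Str.startswith line "## " && !pvTitle2Chap line) <;> simp
          -- flush pending and blanks, then handle the line with no pending
          rw [pvGoB, if_neg (by rw [hbl']; simp), if_neg (by rw [hm']; simp),
            goA_chap_cons_nomerge c line (b ++ line :: rest) rest hc hdrop hm',
            goA_blank_prefix b (line :: rest) hb, hline]
          simp
    · exact hline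

-- ===== VERDICT (by name: the statement is the Claim_ definition above) =====
theorem merge_chapter_headings_spec : Claim_equal_merge_chapter_headings := by
  intro markdown _
  unfold Spec_merge_chapter_headings merge_chapter_headings merge_chapter_headings_alt
  rw [(pvKey (PySem.Str.splitlines markdown)).2]
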